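-- pv_equiv track=rewrite | github.com/takecap/70puzzles | src/q67.py | check
-- ===== SOURCE A (Python) =====
-- def check(arrange):
--   all = sum(arrange, []).count(0)
--   start = arrange[1].index(0)
--   found, diff = set(), {(start, 1)}
--   while len(diff) > 0:
--     temp = set()
--     for (x, y) in diff:
--       if arrange[y][x-1] == 0:
--         temp.add((x-1, y))
--       if arrange[y][x+1] == 0:
--         temp.add((x+1, y))
--       if arrange[y-1][x] == 0:
--         temp.add((x, y-1))
--       if arrange[y+1][x] == 0:
--         temp.add((x, y+1))
--     found |= diff
--     diff = temp - found
--   return all == len(found)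
-- ===== SOURCE B (Python) =====
-- def check(arrange):
--   total = sum(arrange, []).count(0)
--   start = arrange[1].index(0)
--   visited = {(start, 1)}
--   stack = [(start, 1)]
--   while stack:
--     x, y = stack.pop()
--     for n in ((x - 1, y), (x + 1, y), (x, y - 1), (x, y + 1)):
--       if n not in visited and arrange[n[1]][n[0]] == 0:
--         visited.add(n)
--         stack.append(n)
--   return total == len(visited)
-- ===== Notes on version B (the rewrite author's own statement) =====
-- stated objective: simpler
-- what changed: A's layered frontier flood (found/diff/temp sets rebuilt each round with set union and set difference) is replaced by a single depth-first pop-loop over an explicit stack that grows one visited set incrementally; Pre_ excludes exactly the inputs where A raises (missing row 1, no 0 in row 1, or an out-of-range neighbour read during the flood).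
import Mathlib
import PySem

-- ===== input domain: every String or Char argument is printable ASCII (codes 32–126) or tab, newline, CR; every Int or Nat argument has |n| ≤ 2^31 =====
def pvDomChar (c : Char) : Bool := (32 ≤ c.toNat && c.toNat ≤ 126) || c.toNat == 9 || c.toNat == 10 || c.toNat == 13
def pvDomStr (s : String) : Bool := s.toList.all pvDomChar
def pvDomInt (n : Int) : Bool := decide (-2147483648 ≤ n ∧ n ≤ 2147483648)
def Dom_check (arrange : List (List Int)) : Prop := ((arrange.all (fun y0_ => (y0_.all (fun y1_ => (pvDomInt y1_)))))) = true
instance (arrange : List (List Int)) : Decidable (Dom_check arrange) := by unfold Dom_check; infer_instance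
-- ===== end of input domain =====

-- B replaces A's layered frontier bookkeeping (found / diff / temp with set unions and
-- differences) by a single depth-first pop-loop over an explicit stack with one incrementally
-- grown visited set; same return value (alternative decomposition, no speed claim).

-- ===== PORT A =====
-- arrange[y][x] with Python's negative-index wraparound; an out-of-range read is an
-- IndexError in Python (excluded by Pre_check) — here it simply compares unequal to 0.
def zeroAt (g : List (List Int)) (y x : Int) : Bool :=
  (((PySem.List.pyGet? g y).bind fun row => PySem.List.pyGet? row x) == some (0 : Int))

-- body of A's 'for (x, y) in diff' loop: the four conditional temp.add(...)
def addNbrs (g : List (List Int)) (temp : PySem.Set (Int × Int)) (c : Int × Int) :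
    PySem.Set (Int × Int) :=
  let t1 := if zeroAt g c.2 (c.1 - 1) then PySem.Set.add temp (c.1 - 1, c.2) else temp
  let t2 := if zeroAt g c.2 (c.1 + 1) then PySem.Set.add t1 (c.1 + 1, c.2) else t1
  let t3 := if zeroAt g (c.2 - 1) c.1 then PySem.Set.add t2 (c.1, c.2 - 1) else t2
  if zeroAt g (c.2 + 1) c.1 then PySem.Set.add t3 (c.1, c.2 + 1) else t3

-- A's 'while len(diff) > 0' loop; the Nat argument is a guard making the recursion
-- structural — the proof shows it is large enough for the loop to reach diff = ∅.
def loopA (g : List (List Int)) :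
    Nat → PySem.Set (Int × Int) → PySem.Set (Int × Int) → PySem.Set (Int × Int)
  | 0, found, _ => found
  | k + 1, found, diff =>
    if diff.isEmpty then found
    else
      let temp := diff.foldl (addNbrs g) PySem.Set.empty
      let found' := PySem.Set.union found diff
      loopA g k found' (PySem.Set.diff temp found')

def check (arrange : List (List Int)) : Bool :=
  let all := (arrange.foldl (· ++ ·) ([] : List Int)).count 0
  match (PySem.List.pyGet? arrange 1).bind (fun row => PySem.List.index? row 0) with
  | none => false  -- Python raises IndexError / ValueError here; outside Pre_check
  | some start =>
      all == (loopA arrange (4 * arrange.length * (arrange.map List.length).sum + 2)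
        PySem.Set.empty (PySem.Set.add PySem.Set.empty ((start : Int), 1))).length

-- ===== PORT B =====
-- body of B's 'for n in (...)' loop: visit n if unvisited and zero
def visitStep (g : List (List Int)) (st : PySem.Set (Int × Int) × List (Int × Int))
    (n : Int × Int) : PySem.Set (Int × Int) × List (Int × Int) :=
  if !(PySem.Set.contains st.1 n) && zeroAt g n.2 n.1 then (PySem.Set.add st.1 n, n :: st.2)
  else st

-- B's 'while stack' pop-loop (stack kept top-first: Python's append/pop() work at the
-- list's end, here at the head); the Nat argument is the same kind of structural guard.
def loopB (g : List (List Int)) :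
    Nat → PySem.Set (Int × Int) → List (Int × Int) → PySem.Set (Int × Int)
  | 0, visited, _ => visited
  | k + 1, visited, stack =>
    match stack with
    | [] => visited
    | c :: rest =>
      let st := [(c.1 - 1, c.2), (c.1 + 1, c.2), (c.1, c.2 - 1), (c.1, c.2 + 1)].foldl
        (visitStep g) (visited, rest)
      loopB g k st.1 st.2

def check_alt (arrange : List (List Int)) : Bool :=
  let total := (arrange.foldl (· ++ ·) ([] : List Int)).count 0
  match (PySem.List.pyGet? arrange 1).bind (fun row => PySem.List.index? row 0) with
  | none => false  -- same raising inputs as A; outside Pre_check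
  | some start =>
      total == (loopB arrange (8 * arrange.length * (arrange.map List.length).sum + 4)
        (PySem.Set.add PySem.Set.empty ((start : Int), 1)) [((start : Int), 1)]).length

-- ===== PRECONDITION & SPEC =====
-- start = arrange[1].index(0), as the Option it may fail to exist as
def startCell (g : List (List Int)) : Option (Int × Int) :=
  ((PySem.List.pyGet? g 1).bind fun row => PySem.List.index? row 0).map fun s => ((s : Int), 1)

-- visiting cell c performs the four reads arrange[y][x±1], arrange[y±1][x]; safeCell says
-- they are all in range (negative indices wrap, so this is Python's no-IndexError condition)
def safeCell (g : List (List Int)) (c : Int × Int) : Bool :=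
  match PySem.List.pyGet? g c.2, PySem.List.pyGet? g (c.2 - 1), PySem.List.pyGet? g (c.2 + 1) with
  | some r, some ru, some rd =>
      decide (PySem.Raise.InRange r.length (c.1 - 1)) &&
      decide (PySem.Raise.InRange r.length (c.1 + 1)) &&
      decide (PySem.Raise.InRange ru.length c.1) && decide (PySem.Raise.InRange rd.length c.1)
  | _, _, _ => false

-- one closure step of the zero region: from every safe cell already in it, its zero neighbours
def growZ (g : List (List Int)) (S : Finset (Int × Int)) : Finset (Int × Int) :=
  S ∪ (S.filter fun c => safeCell g c).biUnion fun c =>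
    ([(c.1 - 1, c.2), (c.1 + 1, c.2), (c.1, c.2 - 1), (c.1, c.2 + 1)].filter
      fun n => zeroAt g n.2 n.1).toFinset

-- the zero region reachable from s (the closure is stationary long before the iteration
-- count 4·#zeros+2, since each coordinate alias of a zero cell is added at most once)
def zeroRegion (g : List (List Int)) (s : Int × Int) : Finset (Int × Int) :=
  (growZ g)^[4 * (g.flatten.count 0) + 2] {s}

-- Pre_check holds exactly when Python's A returns normally: row index 1 exists and holds a 0,
-- and every cell of the zero region flooded from it (wraparound included) has all four
-- neighbour reads in range — i.e. the flood raises no IndexError.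
def Pre_check (arrange : List (List Int)) : Prop :=
  (startCell arrange).isSome = true ∧
  ∀ c ∈ zeroRegion arrange ((startCell arrange).getD (0, 0)), safeCell arrange c = true

instance (arrange : List (List Int)) : Decidable (Pre_check arrange) := by
  unfold Pre_check; infer_instance

def pvWitness_check : List (List Int) := [[1, 1, 1], [1, 0, 1], [1, 1, 1]]

def Spec_check (arrange : List (List Int)) (out : Bool) : Prop := out = check_alt arrange
instance (arrange : List (List Int)) (out : Bool) : Decidable (Spec_check arrange out) := by
  unfold Spec_check; infer_instance

-- ===== CLAIM (what is proved, stated in full; the proofs are below) =====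
def Claim_equal_check : Prop :=
  ∀ (arrange : List (List Int)), Dom_check arrange → Pre_check arrange →
    Spec_check arrange (check arrange)

-- ===== LEMMAS AND PROOFS =====

lemma zeroAt_eq_true_iff (g : List (List Int)) (y x : Int) :
    zeroAt g y x = true ↔
      ∃ r, PySem.List.pyGet? g y = some r ∧ PySem.List.pyGet? r x = some 0 := by
  simp [zeroAt, Option.bind_eq_some_iff]

-- n is a neighbour of c that A's / B's flood would add: one of the four offsets, holding 0
def nbr (g : List (List Int)) (c n : Int × Int) : Prop :=
  (n = (c.1 - 1, c.2) ∨ n = (c.1 + 1, c.2) ∨ n = (c.1, c.2 - 1) ∨ n = (c.1, c.2 + 1)) ∧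
    zeroAt g n.2 n.1 = true

-- cells reachable from s through zero neighbours: the set both loops compute
inductive ReachZ (g : List (List Int)) (s : Int × Int) : Int × Int → Prop
  | base : ReachZ g s s
  | step {c n : Int × Int} : ReachZ g s c → nbr g c n → ReachZ g s n

-- every cell holding a 0 (wraparound coordinates included) lies in this finite box
noncomputable def boxB (g : List (List Int)) : Finset (Int × Int) :=
  Finset.Icc (-((g.map List.length).sum : Int)) (((g.map List.length).sum : Int) - 1) ×ˢ
    Finset.Icc (-(g.length : Int)) ((g.length : Int) - 1)

lemma card_boxB (g : List (List Int)) :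
    (boxB g).card = 4 * g.length * (g.map List.length).sum := by
  set N := (g.map List.length).sum
  set h := g.length
  rw [boxB, Finset.card_product, Int.card_Icc, Int.card_Icc]
  have h1 : ((N : Int) - 1 + 1 - -(N : Int)).toNat = 2 * N := by omega
  have h2 : ((h : Int) - 1 + 1 - -(h : Int)).toNat = 2 * h := by omega
  rw [h1, h2]; ring

lemma mem_boxB_of_zeroAt {g : List (List Int)} {x y : Int} (h : zeroAt g y x = true) :
    (x, y) ∈ boxB g := by
  rcases (zeroAt_eq_true_iff g y x).1 h with ⟨r, hg, hr⟩
  have hy : PySem.Raise.InRange g.length y := by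
    by_contra hc
    rw [(PySem.List.pyGet?_eq_none_iff g y).2 hc] at hg; cases hg
  have hx : PySem.Raise.InRange r.length x := by
    by_contra hc
    rw [(PySem.List.pyGet?_eq_none_iff r x).2 hc] at hr; cases hr
  have hrl : r.length ≤ (g.map List.length).sum :=
    List.le_sum_of_mem (List.mem_map_of_mem (PySem.List.mem_of_pyGet?_eq_some g hg))
  obtain ⟨hy1, hy2⟩ := hy
  obtain ⟨hx1, hx2⟩ := hx
  simp only [boxB, Finset.mem_product, Finset.mem_Icc]
  constructor <;> constructor <;> omega

lemma length_le_card_of_nodup {l : List (Int × Int)} {S : Finset (Int × Int)}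
    (hn : l.Nodup) (hs : ∀ x ∈ l, x ∈ S) : l.length ≤ S.card := by
  rw [← List.toFinset_card_of_nodup hn]
  exact Finset.card_le_card fun x hx => hs x (List.mem_toFinset.1 hx)

lemma length_lt_of_nodup {l l' : List (Int × Int)} (hn : l.Nodup) (hn' : l'.Nodup)
    (hsub : ∀ x ∈ l, x ∈ l') {d : Int × Int} (hd : d ∈ l') (hnd : d ∉ l) :
    l.length < l'.length := by
  rw [← List.toFinset_card_of_nodup hn, ← List.toFinset_card_of_nodup hn']
  refine Finset.card_lt_card ⟨fun x hx => List.mem_toFinset.2 (hsub x (List.mem_toFinset.1 hx)), ?_⟩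
  intro hsub'
  exact hnd (List.mem_toFinset.1 (hsub' (List.mem_toFinset.2 hd)))

lemma mem_addNbrs (g : List (List Int)) (temp : PySem.Set (Int × Int)) (c x : Int × Int) :
    x ∈ addNbrs g temp c ↔ x ∈ temp ∨ nbr g c x := by
  simp only [addNbrs, nbr]
  split_ifs with h1 h2 h3 h4 <;> simp [PySem.Set.mem_add] <;> aesop

lemma nodup_addNbrs (g : List (List Int)) (temp : PySem.Set (Int × Int)) (c : Int × Int)
    (h : temp.Nodup) : (addNbrs g temp c).Nodup := by
  unfold addNbrs
  split_ifs <;> (repeat' apply PySem.Set.nodup_add) <;> assumption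

lemma mem_foldl_addNbrs (g : List (List Int)) (l : List (Int × Int)) :
    ∀ (temp : PySem.Set (Int × Int)) (x : Int × Int),
      x ∈ l.foldl (addNbrs g) temp ↔ x ∈ temp ∨ ∃ c ∈ l, nbr g c x := by
  induction l with
  | nil => simp
  | cons c l ih => intro temp x; simp [List.foldl_cons, ih, mem_addNbrs]; tauto

lemma nodup_foldl_addNbrs (g : List (List Int)) (l : List (Int × Int)) :
    ∀ temp : PySem.Set (Int × Int), temp.Nodup → (l.foldl (addNbrs g) temp).Nodup := by
  induction l with
  | nil => simp
  | cons c l ih => intro temp h; exact ih _ (nodup_addNbrs g temp c h)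

-- ===== the A loop computes exactly the reachable set =====
lemma loopA_reach (g : List (List Int)) (s : Int × Int) :
    ∀ (n : Nat) (found diff : PySem.Set (Int × Int)),
      found.Nodup → diff.Nodup → (∀ c ∈ diff, c ∉ found) →
      (∀ c ∈ found, zeroAt g c.2 c.1 = true) → (∀ c ∈ diff, zeroAt g c.2 c.1 = true) →
      (∀ c ∈ found, ReachZ g s c) → (∀ c ∈ diff, ReachZ g s c) →
      (s ∈ found ∨ s ∈ diff) →
      (∀ c ∈ found, ∀ m, nbr g c m → m ∈ found ∨ m ∈ diff) →
      (boxB g).card + 1 ≤ n + found.length →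
      (loopA g n found diff).Nodup ∧ ∀ x, x ∈ loopA g n found diff ↔ ReachZ g s x := by
  intro n
  induction n with
  | zero =>
    intro found diff hnf _ _ hzf _ _ _ _ _ hfuel
    exfalso
    have hb : found.length ≤ (boxB g).card :=
      length_le_card_of_nodup hnf fun c hc => by
        simpa using mem_boxB_of_zeroAt (hzf c hc)
    omega
  | succ k ih =>
    intro found diff hnf hnd hdisj hzf hzd hrf hrd hs hcl hfuel
    rw [loopA]
    by_cases hde : diff.isEmpty
    · rw [if_pos hde]
      have hdnil : diff = [] := List.isEmpty_iff.1 hde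
      subst hdnil
      refine ⟨hnf, fun x => ⟨fun hx => hrf x hx, fun hx => ?_⟩⟩
      induction hx with
      | base =>
        cases hs with
        | inl h => exact h
        | inr h => simp at h
      | step hc hn ihm =>
        rcases hcl _ ihm _ hn with h | h
        · exact h
        · simp at h
    · rw [if_neg hde]
      have hmemT : ∀ x, x ∈ diff.foldl (addNbrs g) PySem.Set.empty ↔ ∃ c ∈ diff, nbr g c x := by
        intro x
        simpa [PySem.Set.empty] using mem_foldl_addNbrs g diff PySem.Set.empty x
      have hnT : (diff.foldl (addNbrs g) PySem.Set.empty).Nodup :=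
        nodup_foldl_addNbrs g diff _ (by simp [PySem.Set.empty])
      have hnF' : (PySem.Set.union found diff).Nodup := PySem.Set.nodup_union _ _ hnf
      have hmemF' : ∀ x, x ∈ PySem.Set.union found diff ↔ x ∈ found ∨ x ∈ diff := fun x =>
        PySem.Set.mem_union _ _ _
      obtain ⟨d, hd⟩ : ∃ d, d ∈ diff := by
        cases diff with
        | nil => simp at hde
        | cons a l => exact ⟨a, List.mem_cons_self⟩
      have hgrow : found.length < (PySem.Set.union found diff).length :=
        length_lt_of_nodup hnf hnF' (fun x hx => (hmemF' x).2 (Or.inl hx))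
          ((hmemF' d).2 (Or.inr hd)) (hdisj d hd)
      have hzF' : ∀ c ∈ PySem.Set.union found diff, zeroAt g c.2 c.1 = true := fun c hc => by
        rcases (hmemF' c).1 hc with h | h
        · exact hzf c h
        · exact hzd c h
      refine ih (PySem.Set.union found diff) _ hnF'
        (PySem.Set.nodup_diff _ _ hnT) (fun c hc => ((PySem.Set.mem_diff _ _ c).1 hc).2)
        hzF'
        (fun c hc => by
          rcases (hmemT c).1 ((PySem.Set.mem_diff _ _ c).1 hc).1 with ⟨a, _, han⟩
          exact han.2)
        (fun c hc => by
          rcases (hmemF' c).1 hc with h | h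
          · exact hrf c h
          · exact hrd c h)
        (fun c hc => by
          rcases (hmemT c).1 ((PySem.Set.mem_diff _ _ c).1 hc).1 with ⟨a, ha, han⟩
          exact ReachZ.step (hrd a ha) han)
        (Or.inl ((hmemF' s).2 (hs.imp id id)))
        (fun c hc m hm => by
          rcases (hmemF' c).1 hc with h | h
          · rcases hcl c h m hm with h' | h'
            · exact Or.inl ((hmemF' m).2 (Or.inl h'))
            · exact Or.inl ((hmemF' m).2 (Or.inr h'))
          · by_cases hmf : m ∈ PySem.Set.union found diff
            · exact Or.inl hmf
            · exact Or.inr ((PySem.Set.mem_diff _ _ m).2 ⟨(hmemT m).2 ⟨c, h, hm⟩, hmf⟩))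
        (by omega)


lemma vs_fst_mem (g : List (List Int)) (st : PySem.Set (Int × Int) × List (Int × Int))
    (n x : Int × Int) :
    x ∈ (visitStep g st n).1 ↔ x ∈ st.1 ∨ (x = n ∧ zeroAt g n.2 n.1 = true) := by
  unfold visitStep
  split_ifs with h <;> simp_all [Bool.and_eq_true]
  aesop

lemma vs_snd_mem (g : List (List Int)) (st : PySem.Set (Int × Int) × List (Int × Int))
    (n x : Int × Int) :
    x ∈ (visitStep g st n).2 ↔ x ∈ st.2 ∨ (x = n ∧ zeroAt g n.2 n.1 = true ∧ n ∉ st.1) := by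
  unfold visitStep
  split_ifs with h <;>
    simp_all [Bool.and_eq_true] <;>
    aesop

lemma vs_new (g : List (List Int)) (st : PySem.Set (Int × Int) × List (Int × Int))
    (n x : Int × Int) (hx : x ∈ (visitStep g st n).1) : x ∈ st.1 ∨ x ∈ (visitStep g st n).2 := by
  rcases (vs_fst_mem g st n x).1 hx with h | ⟨rfl, hz⟩
  · exact Or.inl h
  · by_cases hm : x ∈ st.1
    · exact Or.inl hm
    · exact Or.inr ((vs_snd_mem g st x x).2 (Or.inr ⟨rfl, hz, hm⟩))

lemma vs_nodup (g : List (List Int)) (st : PySem.Set (Int × Int) × List (Int × Int))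
    (n : Int × Int) (h : st.1.Nodup) : (visitStep g st n).1.Nodup := by
  unfold visitStep
  split_ifs <;> simp [PySem.Set.nodup_add, h]

lemma vs_len (g : List (List Int)) (st : PySem.Set (Int × Int) × List (Int × Int))
    (n : Int × Int) :
    (visitStep g st n).1.length + st.2.length = st.1.length + (visitStep g st n).2.length := by
  unfold visitStep
  split_ifs with h
  · have hn : n ∉ st.1 := by
      simp only [Bool.and_eq_true, Bool.not_eq_true'] at h
      simpa [PySem.Set.contains_iff] using fun hc => by simp_all
    rw [PySem.Set.add_of_not_mem hn]
    simp; omega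
  · rfl

lemma vs_snd_ge (g : List (List Int)) (st : PySem.Set (Int × Int) × List (Int × Int))
    (n : Int × Int) : st.2.length ≤ (visitStep g st n).2.length := by
  unfold visitStep
  split_ifs <;> simp

lemma fold_fst_mem (g : List (List Int)) (l : List (Int × Int)) :
    ∀ (st : PySem.Set (Int × Int) × List (Int × Int)) (x : Int × Int),
      x ∈ (l.foldl (visitStep g) st).1 ↔ x ∈ st.1 ∨ (x ∈ l ∧ zeroAt g x.2 x.1 = true) := by
  induction l with
  | nil => simp
  | cons n l ih =>
    intro st x
    rw [List.foldl_cons, ih, vs_fst_mem]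
    constructor <;> rintro (h | h) <;> aesop

lemma fold_snd_mono (g : List (List Int)) (l : List (Int × Int)) :
    ∀ (st : PySem.Set (Int × Int) × List (Int × Int)) (x : Int × Int),
      x ∈ st.2 → x ∈ (l.foldl (visitStep g) st).2 := by
  induction l with
  | nil => simp
  | cons n l ih =>
    intro st x hx
    exact ih _ x ((vs_snd_mem g st n x).2 (Or.inl hx))

lemma fold_stackinv (g : List (List Int)) (l : List (Int × Int)) :
    ∀ (st : PySem.Set (Int × Int) × List (Int × Int)),
      (∀ x ∈ st.2, x ∈ st.1) → ∀ x ∈ (l.foldl (visitStep g) st).2, x ∈ (l.foldl (visitStep g) st).1 := by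
  induction l with
  | nil => intro st h; simpa using h
  | cons n l ih =>
    intro st h
    refine ih _ fun x hx => ?_
    rcases (vs_snd_mem g st n x).1 hx with h' | ⟨rfl, hz, _⟩
    · exact (vs_fst_mem g st n x).2 (Or.inl (h x h'))
    · exact (vs_fst_mem g st x x).2 (Or.inr ⟨rfl, hz⟩)

lemma fold_new (g : List (List Int)) (l : List (Int × Int)) :
    ∀ (st : PySem.Set (Int × Int) × List (Int × Int)) (x : Int × Int),
      x ∈ (l.foldl (visitStep g) st).1 → x ∈ st.1 ∨ x ∈ (l.foldl (visitStep g) st).2 := by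
  induction l with
  | nil => intro st x hx; simp only [List.foldl_nil] at hx ⊢; exact Or.inl hx
  | cons n l ih =>
    intro st x hx
    rcases ih _ x hx with h | h
    · rcases vs_new g st n x h with h' | h'
      · exact Or.inl h'
      · exact Or.inr (fold_snd_mono g l _ x h')
    · exact Or.inr h

lemma fold_nodup (g : List (List Int)) (l : List (Int × Int)) :
    ∀ st : PySem.Set (Int × Int) × List (Int × Int),
      st.1.Nodup → (l.foldl (visitStep g) st).1.Nodup := by
  induction l with
  | nil => intro st h; simpa using h
  | cons n l ih => intro st h; exact ih _ (vs_nodup g st n h)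

lemma fold_len (g : List (List Int)) (l : List (Int × Int)) :
    ∀ st : PySem.Set (Int × Int) × List (Int × Int),
      (l.foldl (visitStep g) st).1.length + st.2.length =
        st.1.length + (l.foldl (visitStep g) st).2.length := by
  induction l with
  | nil => simp
  | cons n l ih =>
    intro st
    have h1 := ih (visitStep g st n)
    have h2 := vs_len g st n
    rw [List.foldl_cons]
    omega

lemma fold_snd_ge (g : List (List Int)) (l : List (Int × Int)) :
    ∀ st : PySem.Set (Int × Int) × List (Int × Int),
      st.2.length ≤ (l.foldl (visitStep g) st).2.length := by
  induction l with
  | nil => simp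
  | cons n l ih =>
    intro st
    exact le_trans (vs_snd_ge g st n) (ih (visitStep g st n))

-- ===== the B loop computes exactly the reachable set =====
lemma loopB_reach (g : List (List Int)) (s : Int × Int) :
    ∀ (n : Nat) (visited : PySem.Set (Int × Int)) (stack : List (Int × Int)),
      visited.Nodup →
      (∀ c ∈ visited, zeroAt g c.2 c.1 = true) →
      (∀ c ∈ visited, ReachZ g s c) →
      (∀ c ∈ stack, c ∈ visited) → s ∈ visited →
      (∀ c ∈ visited, c ∈ stack ∨ ∀ m, nbr g c m → m ∈ visited) →
      2 * (boxB g).card + stack.length + 1 ≤ n + 2 * visited.length →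
      (loopB g n visited stack).Nodup ∧ ∀ x, x ∈ loopB g n visited stack ↔ ReachZ g s x := by
  intro n
  induction n with
  | zero =>
    intro visited stack hnv hzv _ _ _ _ hfuel
    exfalso
    have hb : visited.length ≤ (boxB g).card :=
      length_le_card_of_nodup hnv fun c hc => by
        simpa using mem_boxB_of_zeroAt (hzv c hc)
    omega
  | succ k ih =>
    intro visited stack hnv hzv hrv hsv hs hcl hfuel
    cases stack with
    | nil =>
      rw [loopB]
      refine ⟨hnv, fun x => ⟨fun hx => hrv x hx, fun hx => ?_⟩⟩
      induction hx with
      | base => exact hs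
      | step hc hn ihm =>
        rcases hcl _ ihm with h | h
        · simp at h
        · exact h _ hn
    | cons c rest =>
      rw [loopB]
      have hcv : c ∈ visited := hsv c List.mem_cons_self
      have hrest : ∀ x ∈ rest, x ∈ visited := fun x hx => hsv x (List.mem_cons_of_mem c hx)
      have hnbr : ∀ x : Int × Int,
          (x ∈ [(c.1 - 1, c.2), (c.1 + 1, c.2), (c.1, c.2 - 1), (c.1, c.2 + 1)] ∧
            zeroAt g x.2 x.1 = true) ↔ nbr g c x := by
        intro x; simp [nbr]
      have hfm := fold_fst_mem g [(c.1 - 1, c.2), (c.1 + 1, c.2), (c.1, c.2 - 1), (c.1, c.2 + 1)]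
        (visited, rest)
      have hlen := fold_len g [(c.1 - 1, c.2), (c.1 + 1, c.2), (c.1, c.2 - 1), (c.1, c.2 + 1)]
        (visited, rest)
      have hge := fold_snd_ge g [(c.1 - 1, c.2), (c.1 + 1, c.2), (c.1, c.2 - 1), (c.1, c.2 + 1)]
        (visited, rest)
      refine ih _ _
        (fold_nodup g _ _ hnv)
        (fun x hx => by
          rcases (hfm x).1 hx with h | ⟨_, hz⟩
          · exact hzv x h
          · exact hz)
        (fun x hx => by
          rcases (hfm x).1 hx with h | hn
          · exact hrv x h
          · exact ReachZ.step (hrv c hcv) ((hnbr x).1 hn))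
        (fold_stackinv g _ _ (by simpa using hrest))
        ((hfm s).2 (Or.inl hs))
        (fun x hx => by
          rcases fold_new g _ _ x hx with hxv | hxs
          · simp only at hxv
            rcases hcl x hxv with hst | hclosed
            · rcases List.mem_cons.1 hst with rfl | hxr
              · exact Or.inr fun m hm => (hfm m).2 (Or.inr ((hnbr m).2 hm))
              · exact Or.inl (fold_snd_mono g _ (visited, rest) x hxr)
            · exact Or.inr fun m hm => (hfm m).2 (Or.inl (hclosed m hm))
          · exact Or.inl hxs)
        (by
          simp only [List.length_cons] at hfuel
          simp only at hlen hge
          omega)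

-- ===== VERDICT (by name: the statement is the Claim_ definition above) =====
theorem check_spec : Claim_equal_check := by
  intro arrange _ _
  unfold Spec_check
  cases ho : (PySem.List.pyGet? arrange 1).bind (fun row => PySem.List.index? row 0) with
  | none => simp only [check, check_alt, ho]
  | some start =>
    obtain ⟨row, hrow, hidx⟩ := Option.bind_eq_some_iff.1 ho
    obtain ⟨hk, hv, _⟩ := PySem.List.getElem_of_index?_eq_some hidx
    have hz : zeroAt arrange 1 ((start : Int)) = true := by
      refine (zeroAt_eq_true_iff arrange 1 (start : Int)).2 ⟨row, hrow, ?_⟩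
      rw [PySem.List.pyGet?_natCast]
      simp [List.getElem?_eq_getElem hk, hv]
    have hdiff0 : PySem.Set.add PySem.Set.empty ((start : Int), (1 : Int)) =
        [((start : Int), (1 : Int))] := by
      rw [PySem.Set.add_of_not_mem (by simp [PySem.Set.empty])]
      rfl
    have hA := loopA_reach arrange ((start : Int), (1 : Int))
      (4 * arrange.length * (arrange.map List.length).sum + 2) PySem.Set.empty
      (PySem.Set.add PySem.Set.empty ((start : Int), (1 : Int)))
      (by simp [PySem.Set.empty])
      (by rw [hdiff0]; simp)
      (by simp [PySem.Set.empty])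
      (by simp [PySem.Set.empty])
      (fun c hc => by
        rw [hdiff0] at hc; simp at hc; subst hc; exact hz)
      (by simp [PySem.Set.empty])
      (fun c hc => by
        rw [hdiff0] at hc; simp at hc; subst hc; exact ReachZ.base)
      (Or.inr (by rw [hdiff0]; simp))
      (by simp [PySem.Set.empty])
      (by rw [card_boxB]; simp [PySem.Set.empty])
    have hB := loopB_reach arrange ((start : Int), (1 : Int))
      (8 * arrange.length * (arrange.map List.length).sum + 4)
      (PySem.Set.add PySem.Set.empty ((start : Int), (1 : Int))) [((start : Int), (1 : Int))]
      (by rw [hdiff0]; simp)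
      (fun c hc => by
        rw [hdiff0] at hc; simp at hc; subst hc; exact hz)
      (fun c hc => by
        rw [hdiff0] at hc; simp at hc; subst hc; exact ReachZ.base)
      (fun c hc => by simp at hc; subst hc; rw [hdiff0]; simp)
      (by rw [hdiff0]; simp)
      (fun c hc => by
        rw [hdiff0] at hc; simp at hc; subst hc; exact Or.inl (by simp))
      (by
        rw [card_boxB, hdiff0]
        have h8 : 8 * arrange.length * (arrange.map List.length).sum =
            2 * (4 * arrange.length * (arrange.map List.length).sum) := by ring
        rw [h8]
        simp)
    have hperm : (loopA arrange (4 * arrange.length * (arrange.map List.length).sum + 2)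
        PySem.Set.empty (PySem.Set.add PySem.Set.empty ((start : Int), (1 : Int)))).Perm
        (loopB arrange (8 * arrange.length * (arrange.map List.length).sum + 4)
          (PySem.Set.add PySem.Set.empty ((start : Int), (1 : Int)))
          [((start : Int), (1 : Int))]) :=
      (List.perm_ext_iff_of_nodup hA.1 hB.1).2 fun a => (hA.2 a).trans ((hB.2 a).symm)
    simp only [check, check_alt, ho]
    rw [hperm.length_eq]
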